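-- pv_equiv track=rewrite | github.com/kaya70875/articlew | services/utils/helpers.py | extract_paraphrase_sentences
-- ===== SOURCE A (Python) =====
-- def extract_paraphrase_sentences(results):
--     extracted_list = []
--     for i in range(1,6):
--         find_first = results.find(f"{i}.")
--         find_next = results.find(f"{i + 1}.")
--         extract = results[find_first + 3:find_next]
--
--         extracted_list.append(extract)
--
--     return extracted_list
-- ===== SOURCE B (Python) =====
-- def extract_paraphrase_sentences(results):
--     # One left-to-right scan builds a first-occurrence index of the "<digit>."
--     # markers, so the repeated substring searches (str.find) disappear.
--     pos = {}
--     prev = ""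
--     for j, ch in enumerate(results):
--         if ch == "." and "1" <= prev <= "6" and prev not in pos:
--             pos[prev] = j - 1
--         prev = ch
--     bounds = [pos.get(d, -1) for d in "123456"]
--     return [results[bounds[k] + 3:bounds[k + 1]] for k in range(5)]
-- ===== Notes on version B (the rewrite author's own statement) =====
-- stated objective: alternative
-- what changed: B replaces A's ten str.find substring searches with a single character scan over the text that builds a first-occurrence dict for the six digit-followed-by-dot markers (lookbehind on the previous character), then reads the six bounds from the dict and slices adjacent pairs; raw -1 lookups for missing markers flow into the slices unchanged.
import Mathlib
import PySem

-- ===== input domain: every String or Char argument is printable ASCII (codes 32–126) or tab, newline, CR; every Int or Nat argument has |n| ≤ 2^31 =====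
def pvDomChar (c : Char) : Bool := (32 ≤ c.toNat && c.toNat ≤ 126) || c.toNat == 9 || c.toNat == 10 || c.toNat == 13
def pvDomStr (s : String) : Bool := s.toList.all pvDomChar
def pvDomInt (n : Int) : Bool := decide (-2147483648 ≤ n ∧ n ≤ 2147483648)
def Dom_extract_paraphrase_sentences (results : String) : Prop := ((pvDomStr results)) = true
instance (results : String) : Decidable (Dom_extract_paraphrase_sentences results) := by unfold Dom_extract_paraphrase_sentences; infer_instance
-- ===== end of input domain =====

-- B replaces A's repeated str.find searches by a single character scan building a first-occurrence
-- index of the "<digit>." markers, then slices between adjacent marker positions (alternative decomposition).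


-- ===== PORT A =====
def extract_paraphrase_sentences (results : String) : List String :=
  (PySem.List.pyRange 1 6 1).foldl (fun extracted_list i =>
    let find_first := PySem.Str.find results (PySem.Int.toStr i ++ ".")
    let find_next := PySem.Str.find results (PySem.Int.toStr (i + 1) ++ ".")
    let extract := PySem.Str.slice results (some (find_first + 3)) (some find_next)
    extracted_list ++ [extract]) []

-- ===== PORT B =====
-- loop body of B's scan: prev is the previous character (none at the start, Python's "")
def pvStep (st : PySem.Dict Char Int × Option Char) (p : Int × Char) : PySem.Dict Char Int × Option Char :=
  match st.2 with
  | none => (st.1, some p.2)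
  | some c =>
    if p.2 = '.' ∧ '1' ≤ c ∧ c ≤ '6' ∧ st.1.contains c = false then
      (st.1.insert c (p.1 - 1), some p.2)
    else (st.1, some p.2)

def pvScan (results : String) : PySem.Dict Char Int :=
  ((PySem.List.enumerate results.toList).foldl pvStep (PySem.Dict.empty, none)).1

def extract_paraphrase_sentences_alt (results : String) : List String :=
  let bounds := "123456".toList.map (fun d => (pvScan results).getD d (-1))
  (PySem.List.pyRange 0 5 1).map (fun k =>
    PySem.Str.slice results (some (PySem.List.pyGetD bounds k 0 + 3)) (some (PySem.List.pyGetD bounds (k + 1) 0)))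

-- ===== PRECONDITION & SPEC =====
def Spec_extract_paraphrase_sentences (results : String) (out : List String) : Prop := out = extract_paraphrase_sentences_alt results
instance (results : String) (out : List String) : Decidable (Spec_extract_paraphrase_sentences results out) := by unfold Spec_extract_paraphrase_sentences; infer_instance

-- ===== CLAIM (what is proved, stated in full; the proofs are below) =====
def Claim_equal_extract_paraphrase_sentences : Prop := ∀ (results : String), Dom_extract_paraphrase_sentences results → Spec_extract_paraphrase_sentences results (extract_paraphrase_sentences results)

-- ===== LEMMAS AND PROOFS =====

-- find.go at offset k is the offset-0 result shifted by k (or -1)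
lemma pv_go_shift (sub l : List Char) (k : Nat) :
    PySem.Chars.find.go sub l k =
      if PySem.Chars.find.go sub l 0 = -1 then -1 else PySem.Chars.find.go sub l 0 + k := by
  induction l generalizing k with
  | nil => simp [PySem.Chars.find.go]; split <;> simp
  | cons a t ih =>
    simp only [PySem.Chars.find.go]
    split
    · simp
    · rw [ih (k+1), ih 1]
      have hge : -1 ≤ PySem.Chars.find.go sub t 0 := PySem.Chars.neg_one_le_find t sub
      split_ifs with h1 h2 h2 <;> omega

lemma pv_prefix_dot (t : List Char) : (['.'].isPrefixOf t) = (t.head? == some '.') := by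
  cases t with
  | nil => rfl
  | cons b u => simp [List.isPrefixOf, BEq.comm]

lemma pv_find_cons (a : Char) (l sub : List Char) :
    PySem.Chars.find (a :: l) sub =
      if sub.isPrefixOf (a :: l) then 0
      else if PySem.Chars.find l sub = -1 then -1 else PySem.Chars.find l sub + 1 := by
  show PySem.Chars.find.go sub (a :: l) 0 = _
  rw [PySem.Chars.find.go]
  split
  · simp_all
  · rw [pv_go_shift sub l 1]
    simp_all [PySem.Chars.find]

lemma pv_enum_cons (a : Char) (t : List Char) (k : Int) :
    PySem.List.enumerate (a :: t) k = (k, a) :: PySem.List.enumerate t (k + 1) := rfl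

-- invariant of B's scan: the dict entry for a digit c is the first position of "c." (as tracked so far)
lemma pv_scan_inv (c : Char) (hc1 : '1' ≤ c) (hc6 : c ≤ '6')
    (l : List Char) (k : Int) (pos : PySem.Dict Char Int) (prev : Option Char) :
    (((PySem.List.enumerate l k).foldl pvStep (pos, prev)).1).getD c (-1) =
      if pos.contains c then pos.getD c (-1)
      else if prev = some c ∧ l.head? = some '.' then k - 1
      else if PySem.Chars.find l [c, '.'] = -1 then -1 else k + PySem.Chars.find l [c, '.'] := by
  have hcdot : c ≠ '.' := by
    intro h; subst h; exact absurd hc1 (by decide)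
  induction l generalizing k pos prev with
  | nil =>
    simp only [PySem.List.enumerate, List.foldl_nil]
    rw [show PySem.Chars.find ([] : List Char) [c, '.'] = -1 from rfl]
    by_cases h1 : pos.contains c
    · simp [h1]
    · simp [h1, PySem.Dict.getD_of_not_contains pos (k := c) (-1) (by simp [h1])]
  | cons a t ih =>
    rw [pv_enum_cons, List.foldl_cons]
    have hge : -1 ≤ PySem.Chars.find t [c, '.'] := PySem.Chars.neg_one_le_find t [c, '.']
    have hfc := pv_find_cons a t [c, '.']
    have hpre : ([c, '.'].isPrefixOf (a :: t)) = ((c == a) && (t.head? == some '.')) := by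
      simp [List.isPrefixOf, pv_prefix_dot]
    by_cases hprev : ∃ c', prev = some c'
    · obtain ⟨c', rfl⟩ := hprev
      simp only [pvStep]
      by_cases hq : a = '.' ∧ '1' ≤ c' ∧ c' ≤ '6' ∧ pos.contains c' = false
      · rw [if_pos hq]
        obtain ⟨ha, hr1, hr6, hnc⟩ := hq
        by_cases hcc : c' = c
        · subst hcc
          rw [ih]
          rw [if_pos (PySem.Dict.contains_insert_self pos c' (k - 1)),
            PySem.Dict.getD_insert_self, if_neg (by simp [hnc]),
            if_pos ⟨rfl, by simp [ha]⟩]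
        · rw [ih]
          have hct : (pos.insert c' (k - 1)).contains c = pos.contains c := by
            rw [PySem.Dict.contains_insert]; simp [Ne.symm hcc]
          rw [hct, PySem.Dict.getD_insert_of_ne pos (k - 1) (-1) (Ne.symm hcc),
            if_neg (by simp [hcc] : ¬ (some c' = some c ∧ (a :: t).head? = some '.'))]
          subst ha
          rw [if_neg (by simp [Ne.symm hcdot] : ¬ (some '.' = some c ∧ t.head? = some '.'))]
          rw [hfc, hpre, show (c == '.') = false by simp [hcdot]]
          by_cases h1 : pos.contains c
          · simp [h1]
          · simp only [if_neg h1, Bool.false_and, Bool.false_eq_true, if_false]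
            split_ifs <;> omega
      · rw [if_neg hq, ih]
        by_cases h1 : pos.contains c
        · simp [h1]
        · simp only [if_neg h1]
          by_cases hb : c' = c ∧ a = '.'
          · obtain ⟨h1', h2'⟩ := hb
            subst h2'
            have hcontr : pos.contains c' = true := by
              by_contra hx
              simp only [Bool.not_eq_true] at hx
              exact hq ⟨rfl, h1' ▸ hc1, h1' ▸ hc6, hx⟩
            exact absurd (h1' ▸ hcontr) h1
          · have hb2 : ¬ (some c' = some c ∧ (a :: t).head? = some '.') := by
              simp only [List.head?_cons, Option.some.injEq]
              rintro ⟨h1', h2'⟩; exact hb ⟨h1', h2'⟩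
            rw [if_neg hb2]
            by_cases hac : a = c
            · subst hac
              by_cases hh : t.head? = some '.'
              · rw [if_pos ⟨rfl, hh⟩, hfc, hpre]
                simp [hh]
              · rw [if_neg (by simp [hh]), hfc, hpre]
                simp only [beq_self_eq_true, Bool.true_and]
                rw [show (t.head? == some '.') = false by simp [hh]]
                simp only [Bool.false_eq_true, if_false]
                split_ifs <;> omega
            · rw [if_neg (by simp [hac] : ¬ (some a = some c ∧ t.head? = some '.')),
                hfc, hpre, show (c == a) = false by simp [Ne.symm hac]]
              simp only [Bool.false_and, Bool.false_eq_true, if_false]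
              split_ifs <;> omega
    · have hpn : prev = none := by cases prev <;> simp_all
      subst hpn
      simp only [pvStep]
      rw [ih]
      by_cases h1 : pos.contains c
      · simp [h1]
      · simp only [if_neg h1,
          if_neg (by simp : ¬ ((none : Option Char) = some c ∧ (a :: t).head? = some '.'))]
        by_cases hac : a = c
        · subst hac
          by_cases hh : t.head? = some '.'
          · rw [if_pos ⟨rfl, hh⟩, hfc, hpre]
            simp [hh]
          · rw [if_neg (by simp [hh]), hfc, hpre]
            simp only [beq_self_eq_true, Bool.true_and]
            rw [show (t.head? == some '.') = false by simp [hh]]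
            simp only [Bool.false_eq_true, if_false]
            split_ifs <;> omega
        · rw [if_neg (by simp [hac] : ¬ (some a = some c ∧ t.head? = some '.')),
            hfc, hpre, show (c == a) = false by simp [Ne.symm hac]]
          simp only [Bool.false_and, Bool.false_eq_true, if_false]
          split_ifs <;> omega

-- B's scanned first occurrence of "c." is exactly Python's results.find(c + ".")
lemma pv_scan_getD (results : String) (c : Char) (hc1 : '1' ≤ c) (hc6 : c ≤ '6') :
    (pvScan results).getD c (-1) = PySem.Chars.find results.toList [c, '.'] := by
  unfold pvScan
  rw [pv_scan_inv c hc1 hc6 results.toList 0 PySem.Dict.empty none]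
  have hge := PySem.Chars.neg_one_le_find results.toList [c, '.']
  simp only [PySem.Dict.contains_empty, Bool.false_eq_true, if_false,
    if_neg (by simp : ¬ ((none : Option Char) = some c ∧ results.toList.head? = some '.'))]
  split_ifs <;> omega

-- ===== VERDICT (by name: the statement is the Claim_ definition above) =====
theorem extract_paraphrase_sentences_spec : Claim_equal_extract_paraphrase_sentences := by
  intro results _
  unfold Spec_extract_paraphrase_sentences extract_paraphrase_sentences extract_paraphrase_sentences_alt
  have h1 := pv_scan_getD results '1' (by decide) (by decide)
  have h2 := pv_scan_getD results '2' (by decide) (by decide)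
  have h3 := pv_scan_getD results '3' (by decide) (by decide)
  have h4 := pv_scan_getD results '4' (by decide) (by decide)
  have h5 := pv_scan_getD results '5' (by decide) (by decide)
  have h6 := pv_scan_getD results '6' (by decide) (by decide)
  simp only [show PySem.List.pyRange 1 6 1 = [1,2,3,4,5] from rfl,
    show PySem.List.pyRange 0 5 1 = [0,1,2,3,4] from rfl,
    show ("123456".toList : List Char) = ['1','2','3','4','5','6'] from rfl,
    List.foldl_cons, List.foldl_nil, List.map_cons, List.map_nil,
    List.nil_append, List.cons_append, h1, h2, h3, h4, h5, h6]
  simp [PySem.List.pyGetD, PySem.List.pyGet?, PySem.List.pyIdx?, PySem.Int.toStr,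
    show PySem.Int.toChars 1 = ['1'] from rfl, show PySem.Int.toChars 2 = ['2'] from rfl,
    show PySem.Int.toChars 3 = ['3'] from rfl, show PySem.Int.toChars 4 = ['4'] from rfl,
    show PySem.Int.toChars 5 = ['5'] from rfl, show PySem.Int.toChars 6 = ['6'] from rfl]
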